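-- pv_equiv track=rewrite | github.com/igornersisian/Job-search-automation | tools/process_jobs.py | _normalise_company
-- ===== SOURCE A (Python) =====
-- _COMPANY_SUFFIXES = [
--     ", inc.", ", inc", " inc.", " inc",
--     ", llc", " llc",
--     ", ltd.", ", ltd", " ltd.", " ltd",
--     ", corp.", ", corp", " corp.", " corp",
--     ", co.", ", co", " co.",
--     ", gmbh", " gmbh",
--     ", s.a.", " s.a.",
--     ", plc", " plc",
--     ", ag", " ag",
--     ", pty", " pty",
-- ]
--
-- def _normalise_company(company: str) -> str:
--     """Normalise a company name for dedup comparison."""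
--     c = company.lower().strip()
--     for suffix in _COMPANY_SUFFIXES:
--         if c.endswith(suffix):
--             c = c[: -len(suffix)].strip()
--             break
--     # Remove trailing punctuation
--     c = c.rstrip(".,")
--     return c
-- ===== SOURCE B (Python) =====
-- _SUFFIX_TOKENS = {
--     "inc", "inc.", "llc", "ltd", "ltd.", "corp", "corp.",
--     "co.", "gmbh", "s.a.", "plc", "ag", "pty",
-- }
-- # A bare "co" (no dot) is too common a word fragment to strip on its own,
-- # so it is only dropped when a comma separates it from the name.
-- _COMMA_SUFFIX_TOKENS = _SUFFIX_TOKENS | {"co"}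
--
-- def _normalise_company(company: str) -> str:
--     """Normalise a company name for dedup comparison.
--
--     Look only at the word after the last space and drop it when it is a
--     known corporate suffix token (together with a comma on the preceding
--     word, if any)."""
--     c = company.lower().strip()
--     head, sep, last = c.rpartition(" ")
--     if sep:
--         if head.endswith(","):
--             if last in _COMMA_SUFFIX_TOKENS:
--                 c = head[:-1].strip()
--         elif last in _SUFFIX_TOKENS:
--             c = head.strip()
--     return c.rstrip(".,")
-- ===== Notes on version B (the rewrite author's own statement) =====
-- stated objective: alternative
-- what changed: Replaces A's ordered endswith-loop over 27 suffix strings by a single rpartition on the last space: the final word is tested against a small token set (with 'co' accepted only after a comma) and dropped together with the separator.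
import Mathlib
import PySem

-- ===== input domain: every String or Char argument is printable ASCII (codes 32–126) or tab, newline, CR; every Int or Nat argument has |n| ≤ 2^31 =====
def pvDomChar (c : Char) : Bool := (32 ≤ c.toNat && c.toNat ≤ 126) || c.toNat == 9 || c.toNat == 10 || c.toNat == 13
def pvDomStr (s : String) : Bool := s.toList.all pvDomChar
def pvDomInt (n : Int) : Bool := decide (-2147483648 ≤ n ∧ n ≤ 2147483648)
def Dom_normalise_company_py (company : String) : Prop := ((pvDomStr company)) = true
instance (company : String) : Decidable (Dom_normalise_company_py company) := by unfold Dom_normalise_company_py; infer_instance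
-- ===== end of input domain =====

-- B looks only at the word after the last space (rpartition) and drops it when it is a
-- known corporate suffix token, instead of A's ordered endswith-loop over 27 suffix strings;
-- alternative decomposition, same behaviour.

-- hand port of Python's  s.rstrip(".,")  (PySem has no rstrip-with-chars): drop the
-- trailing run of '.'/',' characters; exact on all strings. Used by both ports,
-- since both Pythons end with the same  c.rstrip('.,')  call.
def pvRstripCD (l : List Char) : List Char :=
  (l.reverse.dropWhile (fun ch => ch == '.' || ch == ',')).reverse

-- ===== PORT A =====
-- _COMPANY_SUFFIXES, each string literal written as its code-point list
def pvSuffixes : List (List Char) :=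
  [[',', ' ', 'i', 'n', 'c', '.'], [',', ' ', 'i', 'n', 'c'], [' ', 'i', 'n', 'c', '.'], [' ', 'i', 'n', 'c'],
   [',', ' ', 'l', 'l', 'c'], [' ', 'l', 'l', 'c'],
   [',', ' ', 'l', 't', 'd', '.'], [',', ' ', 'l', 't', 'd'], [' ', 'l', 't', 'd', '.'], [' ', 'l', 't', 'd'],
   [',', ' ', 'c', 'o', 'r', 'p', '.'], [',', ' ', 'c', 'o', 'r', 'p'], [' ', 'c', 'o', 'r', 'p', '.'], [' ', 'c', 'o', 'r', 'p'],
   [',', ' ', 'c', 'o', '.'], [',', ' ', 'c', 'o'], [' ', 'c', 'o', '.'],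
   [',', ' ', 'g', 'm', 'b', 'h'], [' ', 'g', 'm', 'b', 'h'],
   [',', ' ', 's', '.', 'a', '.'], [' ', 's', '.', 'a', '.'],
   [',', ' ', 'p', 'l', 'c'], [' ', 'p', 'l', 'c'],
   [',', ' ', 'a', 'g'], [' ', 'a', 'g'],
   [',', ' ', 'p', 't', 'y'], [' ', 'p', 't', 'y']]

-- the for/endswith/break loop strips at the FIRST matching suffix = List.find?;
-- c[: -len(suffix)] is the negative-bound slice.
def normalise_company_py (company : String) : String :=
  let c := PySem.Chars.strip (PySem.Chars.lower company.toList)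
  let c :=
    match pvSuffixes.find? (fun suf => PySem.Chars.endswith c suf) with
    | some suf => PySem.Chars.strip (PySem.Chars.slice c none (some (-(suf.length : Int))))
    | none => c
  String.ofList (pvRstripCD c)

-- ===== PORT B =====
-- _SUFFIX_TOKENS and _COMMA_SUFFIX_TOKENS = _SUFFIX_TOKENS | {"co"}, literals as code-point lists
def pvTokens : List (List Char) :=
  [['i', 'n', 'c'], ['i', 'n', 'c', '.'], ['l', 'l', 'c'], ['l', 't', 'd'], ['l', 't', 'd', '.'], ['c', 'o', 'r', 'p'], ['c', 'o', 'r', 'p', '.'], ['c', 'o', '.'], ['g', 'm', 'b', 'h'], ['s', '.', 'a', '.'], ['p', 'l', 'c'], ['a', 'g'], ['p', 't', 'y']]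
def pvCommaTokens : List (List Char) := pvTokens ++ [['c', 'o']]

-- hand port of c.rpartition(" ") (PySem has no rpartition): the last space is the first
-- space of the reverse; returns none when the separator is absent (sep = ""), else
-- (head, last) = (c[:i], c[i+1:]) for i the index of the last space. Exact on all strings.
def pvRPartSpace (c : List Char) : Option (List Char × List Char) :=
  let j := PySem.Chars.find c.reverse [' ']
  if j = -1 then none
  else some (c.take (c.length - 1 - j.toNat), c.drop (c.length - j.toNat))

def normalise_company_py_alt (company : String) : String :=
  let c := PySem.Chars.strip (PySem.Chars.lower company.toList)
  let c :=
    match pvRPartSpace c with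
    | some (head, last) =>
      if PySem.Chars.endswith head [','] then
        if pvCommaTokens.contains last then
          PySem.Chars.strip (PySem.Chars.slice head none (some (-1)))
        else c
      else if pvTokens.contains last then PySem.Chars.strip head
      else c
    | none => c
  String.ofList (pvRstripCD c)

-- ===== PRECONDITION & SPEC =====
def Spec_normalise_company_py (company : String) (out : String) : Prop := out = normalise_company_py_alt company
instance (company : String) (out : String) : Decidable (Spec_normalise_company_py company out) := by unfold Spec_normalise_company_py; infer_instance

-- ===== CLAIM (what is proved, stated in full; the proofs are below) =====
def Claim_equal_normalise_company_py : Prop := ∀ (company : String), Dom_normalise_company_py company → Spec_normalise_company_py company (normalise_company_py company)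

-- ===== LEMMAS AND PROOFS =====

theorem pv_bool_ext {a b : Bool} (h : a = true ↔ b = true) : a = b := by
  cases a <;> cases b <;> simp_all

theorem pv_singleton_prefix (l : List Char) (a : Char) : [a] <+: l ↔ l.head? = some a := by
  cases l <;> simp [List.cons_prefix_cons, eq_comm]

-- split off the maximal space-free prefix of the reverse
theorem pv_decomp (r : List Char) (h : ' ' ∈ r) :
    ∃ S P', (' ' ∉ S) ∧ r = S ++ ' ' :: P' := by
  induction r with
  | nil => simp at h
  | cons a r ih =>
    by_cases ha : a = ' '
    · exact ⟨[], r, by simp, by simp [ha]⟩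
    · have hr : ' ' ∈ r := by
        rcases List.mem_cons.mp h with h1 | h1
        · exact absurd h1.symm ha
        · exact h1
      obtain ⟨S, P', hS, hre⟩ := ih hr
      refine ⟨a :: S, P', ?_, by simp [hre]⟩
      intro hmem
      rcases List.mem_cons.mp hmem with h1 | h1
      · exact ha h1.symm
      · exact hS h1

theorem pv_find_space (S P' : List Char) (hS : ' ' ∉ S) :
    PySem.Chars.find (S ++ ' ' :: P') [' '] = (S.length : Int) := by
  have hinf : [' '] <:+: S ++ ' ' :: P' := ⟨S, P', by simp⟩
  have h0 : 0 ≤ PySem.Chars.find (S ++ ' ' :: P') [' '] :=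
    (PySem.Chars.find_nonneg_iff _ _).mpr hinf
  obtain ⟨hpre, hmin⟩ := PySem.Chars.find_spec h0
  set n := (PySem.Chars.find (S ++ ' ' :: P') [' ']).toNat with hn
  have hget : (S ++ ' ' :: P')[n]? = some ' ' := by
    rw [← List.head?_drop]; exact (pv_singleton_prefix _ _).mp hpre
  have hSn : (S ++ ' ' :: P')[S.length]? = some ' ' := by
    simp
  have hle : n ≤ S.length := by
    by_contra hgt
    push_neg at hgt
    exact hmin S.length hgt ((pv_singleton_prefix _ _).mpr (by rw [List.head?_drop]; exact hSn))
  have hge : ¬ n < S.length := by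
    intro hlt
    have h1 : S[n]? = some ' ' := by
      rw [← List.getElem?_append_left (l₂ := ' ' :: P') hlt]
      exact hget
    exact hS (List.mem_of_getElem? h1)
  have hns : n = S.length := by omega
  rw [← Int.toNat_of_nonneg h0, ← hn, hns]

theorem pv_prefix_space (A W S P' : List Char) (hA : ' ' ∉ A) (hS : ' ' ∉ S) :
    A ++ ' ' :: W <+: S ++ ' ' :: P' ↔ A = S ∧ W <+: P' := by
  induction A generalizing S with
  | nil =>
    cases S with
    | nil => simp [List.cons_prefix_cons]
    | cons s S' =>
      simp only [List.nil_append, List.cons_append, List.cons_prefix_cons]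
      constructor
      · rintro ⟨h1, -⟩
        exact absurd (List.mem_cons.mpr (Or.inl h1)) hS
      · rintro ⟨h1, -⟩
        exact absurd h1 (by simp)
  | cons a A' ih =>
    cases S with
    | nil =>
      simp only [List.cons_append, List.nil_append, List.cons_prefix_cons]
      constructor
      · rintro ⟨h1, -⟩
        exact absurd (List.mem_cons.mpr (Or.inl h1.symm)) hA
      · rintro ⟨h1, -⟩
        exact absurd h1 (by simp)
    | cons s S' =>
      have hA' : ' ' ∉ A' := fun hmem => hA (List.mem_cons.mpr (Or.inr hmem))
      have hS' : ' ' ∉ S' := fun hmem => hS (List.mem_cons.mpr (Or.inr hmem))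
      simp only [List.cons_append, List.cons_prefix_cons, ih S' hA' hS', List.cons.injEq]
      tauto

theorem pv_ends_plain (c S P' X : List Char) (hS : ' ' ∉ S) (hr : c.reverse = S ++ ' ' :: P')
    (hX : ' ' ∉ X) :
    PySem.Chars.endswith c (' ' :: X) = (X.reverse == S) := by
  apply pv_bool_ext
  rw [PySem.Chars.endswith_iff, beq_iff_eq]
  have hXr : ' ' ∉ X.reverse := by simpa using hX
  constructor
  · intro h
    have hp : (' ' :: X).reverse <+: c.reverse := List.reverse_prefix.mpr h
    rw [hr, List.reverse_cons] at hp
    have hp' : X.reverse ++ ' ' :: ([] : List Char) <+: S ++ ' ' :: P' := by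
      simpa using hp
    exact ((pv_prefix_space _ _ _ _ hXr hS).mp hp').1
  · intro h
    apply List.reverse_prefix.mp
    rw [hr, List.reverse_cons]
    have : X.reverse ++ ' ' :: ([] : List Char) <+: S ++ ' ' :: P' :=
      (pv_prefix_space _ _ _ _ hXr hS).mpr ⟨h, List.nil_prefix⟩
    simpa using this

theorem pv_ends_comma (c S P' X : List Char) (hS : ' ' ∉ S) (hr : c.reverse = S ++ ' ' :: P')
    (hX : ' ' ∉ X) :
    PySem.Chars.endswith c (',' :: ' ' :: X) = (X.reverse == S && P'.head? == some ',') := by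
  apply pv_bool_ext
  rw [PySem.Chars.endswith_iff]
  have hXr : ' ' ∉ X.reverse := by simpa using hX
  have hiff : (',' :: ' ' :: X) <:+ c ↔ X.reverse = S ∧ [','] <+: P' := by
    constructor
    · intro h
      have hp : (',' :: ' ' :: X).reverse <+: c.reverse := List.reverse_prefix.mpr h
      rw [hr] at hp
      have hp' : X.reverse ++ ' ' :: ([','] : List Char) <+: S ++ ' ' :: P' := by
        simpa using hp
      exact (pv_prefix_space _ _ _ _ hXr hS).mp hp'
    · rintro ⟨h1, h2⟩
      apply List.reverse_prefix.mp
      rw [hr]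
      have : X.reverse ++ ' ' :: ([','] : List Char) <+: S ++ ' ' :: P' :=
        (pv_prefix_space _ _ _ _ hXr hS).mpr ⟨h1, h2⟩
      simpa using this
  rw [hiff, pv_singleton_prefix]
  simp

theorem pv_cutA (c : List Char) (k : Nat) (hk : 0 < k) :
    PySem.Chars.slice c none (some (-(k : Int))) = c.take (c.length - k) := by
  rw [PySem.Chars.slice_eq_listSlice, PySem.List.slice_to_neg_natCast _ _ hk]

theorem pv_c_eq (c S P' : List Char) (hr : c.reverse = S ++ ' ' :: P') :
    c = P'.reverse ++ ' ' :: S.reverse := by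
  have h := congrArg List.reverse hr
  simpa using h

theorem pv_len_eq (c S P' : List Char) (hr : c.reverse = S ++ ' ' :: P') :
    c.length = P'.length + 1 + S.length := by
  have h := congrArg List.length hr
  simp at h
  omega

theorem pv_head_eq (c S P' : List Char) (hr : c.reverse = S ++ ' ' :: P') :
    c.take P'.length = P'.reverse := by
  rw [pv_c_eq c S P' hr]
  rw [show P'.length = P'.reverse.length by simp, List.take_left]

theorem pv_last_eq (c S P' : List Char) (hr : c.reverse = S ++ ' ' :: P') :
    c.drop (P'.length + 1) = S.reverse := by
  rw [pv_c_eq c S P' hr]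
  rw [List.drop_append]
  have h1 : List.drop (P'.length + 1) P'.reverse = [] := List.drop_eq_nil_of_le (by simp)
  have h2 : P'.length + 1 - P'.reverse.length = 1 := by simp
  rw [h1, h2]
  rfl

-- c.rpartition(" ") under the reverse decomposition
theorem pv_rpart_eq (c S P' : List Char) (hS : ' ' ∉ S) (hr : c.reverse = S ++ ' ' :: P') :
    pvRPartSpace c = some (P'.reverse, S.reverse) := by
  have hj : PySem.Chars.find c.reverse [' '] = (S.length : Int) := by
    rw [hr]; exact pv_find_space S P' hS
  have hlen := pv_len_eq c S P' hr
  unfold pvRPartSpace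
  rw [hj]
  rw [if_neg (by omega)]
  have ht : (S.length : Int).toNat = S.length := Int.toNat_natCast _
  rw [ht]
  have h1 : c.length - 1 - S.length = P'.length := by omega
  have h2 : c.length - S.length = P'.length + 1 := by omega
  rw [h1, h2, pv_head_eq c S P' hr, pv_last_eq c S P' hr]

theorem pv_head_comma (P' : List Char) :
    PySem.Chars.endswith P'.reverse [','] = (P'.head? == some ',') := by
  apply pv_bool_ext
  rw [PySem.Chars.endswith_iff]
  rw [show ([','] : List Char) = [','].reverse from rfl, List.reverse_suffix]
  rw [pv_singleton_prefix]
  simp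

theorem pv_cut_comma (c S P' : List Char) (hr : c.reverse = S ++ ' ' :: P') (k : Nat)
    (hk : k = S.length + 2) (hPne : P' ≠ []) :
    PySem.Chars.slice c none (some (-(k : Int))) =
      PySem.Chars.slice P'.reverse none (some (-1)) := by
  have hlen := pv_len_eq c S P' hr
  have hP1 : 1 ≤ P'.length := List.length_pos_of_ne_nil hPne
  rw [pv_cutA c k (by omega)]
  rw [show ((-1 : Int)) = -((1 : Nat) : Int) from rfl, pv_cutA P'.reverse 1 one_pos]
  rw [pv_c_eq c S P' hr]
  rw [List.take_append_of_le_length (by simp; omega)]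
  congr 1
  simp
  omega

theorem pv_cut_plain (c S P' : List Char) (hr : c.reverse = S ++ ' ' :: P') (k : Nat)
    (hk : k = S.length + 1) :
    PySem.Chars.slice c none (some (-(k : Int))) = P'.reverse := by
  have hlen := pv_len_eq c S P' hr
  rw [pv_cutA c k (by omega)]
  have h1 : c.length - k = P'.length := by omega
  rw [h1, pv_head_eq c S P' hr]

set_option maxHeartbeats 3200000 in
theorem pv_mid_eq (c : List Char) :
    (match pvSuffixes.find? (fun suf => PySem.Chars.endswith c suf) with
     | some suf => PySem.Chars.strip (PySem.Chars.slice c none (some (-(suf.length : Int))))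
     | none => c)
    =
    (match pvRPartSpace c with
     | some (head, last) =>
       if PySem.Chars.endswith head [','] then
         if pvCommaTokens.contains last then
           PySem.Chars.strip (PySem.Chars.slice head none (some (-1)))
         else c
       else if pvTokens.contains last then PySem.Chars.strip head
       else c
     | none => c) := by
  by_cases hmem : ' ' ∈ c.reverse
  · obtain ⟨S, P', hS, hr⟩ := pv_decomp _ hmem
    have hrp := pv_rpart_eq c S P' hS hr
    have EP : ∀ X : List Char, ' ' ∉ X →
        PySem.Chars.endswith c (' ' :: X) = (X == S.reverse) := by
      intro X hX
      rw [pv_ends_plain c S P' X hS hr hX]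
      apply pv_bool_ext
      simp [List.reverse_eq_iff, beq_iff_eq]
    have EC : ∀ X : List Char, ' ' ∉ X →
        PySem.Chars.endswith c (',' :: ' ' :: X) = (X == S.reverse && (P'.head? == some ',')) := by
      intro X hX
      rw [pv_ends_comma c S P' X hS hr hX]
      congr 1
      apply pv_bool_ext
      simp [List.reverse_eq_iff, beq_iff_eq]
    have E1 : PySem.Chars.endswith c [',', ' ', 'i', 'n', 'c', '.'] = (['i', 'n', 'c', '.'] == S.reverse && (P'.head? == some ',')) := EC ['i', 'n', 'c', '.'] (by decide)
    have E2 : PySem.Chars.endswith c [',', ' ', 'i', 'n', 'c'] = (['i', 'n', 'c'] == S.reverse && (P'.head? == some ',')) := EC ['i', 'n', 'c'] (by decide)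
    have E3 : PySem.Chars.endswith c [' ', 'i', 'n', 'c', '.'] = (['i', 'n', 'c', '.'] == S.reverse) := EP ['i', 'n', 'c', '.'] (by decide)
    have E4 : PySem.Chars.endswith c [' ', 'i', 'n', 'c'] = (['i', 'n', 'c'] == S.reverse) := EP ['i', 'n', 'c'] (by decide)
    have E5 : PySem.Chars.endswith c [',', ' ', 'l', 'l', 'c'] = (['l', 'l', 'c'] == S.reverse && (P'.head? == some ',')) := EC ['l', 'l', 'c'] (by decide)
    have E6 : PySem.Chars.endswith c [' ', 'l', 'l', 'c'] = (['l', 'l', 'c'] == S.reverse) := EP ['l', 'l', 'c'] (by decide)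
    have E7 : PySem.Chars.endswith c [',', ' ', 'l', 't', 'd', '.'] = (['l', 't', 'd', '.'] == S.reverse && (P'.head? == some ',')) := EC ['l', 't', 'd', '.'] (by decide)
    have E8 : PySem.Chars.endswith c [',', ' ', 'l', 't', 'd'] = (['l', 't', 'd'] == S.reverse && (P'.head? == some ',')) := EC ['l', 't', 'd'] (by decide)
    have E9 : PySem.Chars.endswith c [' ', 'l', 't', 'd', '.'] = (['l', 't', 'd', '.'] == S.reverse) := EP ['l', 't', 'd', '.'] (by decide)
    have E10 : PySem.Chars.endswith c [' ', 'l', 't', 'd'] = (['l', 't', 'd'] == S.reverse) := EP ['l', 't', 'd'] (by decide)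
    have E11 : PySem.Chars.endswith c [',', ' ', 'c', 'o', 'r', 'p', '.'] = (['c', 'o', 'r', 'p', '.'] == S.reverse && (P'.head? == some ',')) := EC ['c', 'o', 'r', 'p', '.'] (by decide)
    have E12 : PySem.Chars.endswith c [',', ' ', 'c', 'o', 'r', 'p'] = (['c', 'o', 'r', 'p'] == S.reverse && (P'.head? == some ',')) := EC ['c', 'o', 'r', 'p'] (by decide)
    have E13 : PySem.Chars.endswith c [' ', 'c', 'o', 'r', 'p', '.'] = (['c', 'o', 'r', 'p', '.'] == S.reverse) := EP ['c', 'o', 'r', 'p', '.'] (by decide)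
    have E14 : PySem.Chars.endswith c [' ', 'c', 'o', 'r', 'p'] = (['c', 'o', 'r', 'p'] == S.reverse) := EP ['c', 'o', 'r', 'p'] (by decide)
    have E15 : PySem.Chars.endswith c [',', ' ', 'c', 'o', '.'] = (['c', 'o', '.'] == S.reverse && (P'.head? == some ',')) := EC ['c', 'o', '.'] (by decide)
    have E16 : PySem.Chars.endswith c [',', ' ', 'c', 'o'] = (['c', 'o'] == S.reverse && (P'.head? == some ',')) := EC ['c', 'o'] (by decide)
    have E17 : PySem.Chars.endswith c [' ', 'c', 'o', '.'] = (['c', 'o', '.'] == S.reverse) := EP ['c', 'o', '.'] (by decide)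
    have E18 : PySem.Chars.endswith c [',', ' ', 'g', 'm', 'b', 'h'] = (['g', 'm', 'b', 'h'] == S.reverse && (P'.head? == some ',')) := EC ['g', 'm', 'b', 'h'] (by decide)
    have E19 : PySem.Chars.endswith c [' ', 'g', 'm', 'b', 'h'] = (['g', 'm', 'b', 'h'] == S.reverse) := EP ['g', 'm', 'b', 'h'] (by decide)
    have E20 : PySem.Chars.endswith c [',', ' ', 's', '.', 'a', '.'] = (['s', '.', 'a', '.'] == S.reverse && (P'.head? == some ',')) := EC ['s', '.', 'a', '.'] (by decide)
    have E21 : PySem.Chars.endswith c [' ', 's', '.', 'a', '.'] = (['s', '.', 'a', '.'] == S.reverse) := EP ['s', '.', 'a', '.'] (by decide)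
    have E22 : PySem.Chars.endswith c [',', ' ', 'p', 'l', 'c'] = (['p', 'l', 'c'] == S.reverse && (P'.head? == some ',')) := EC ['p', 'l', 'c'] (by decide)
    have E23 : PySem.Chars.endswith c [' ', 'p', 'l', 'c'] = (['p', 'l', 'c'] == S.reverse) := EP ['p', 'l', 'c'] (by decide)
    have E24 : PySem.Chars.endswith c [',', ' ', 'a', 'g'] = (['a', 'g'] == S.reverse && (P'.head? == some ',')) := EC ['a', 'g'] (by decide)
    have E25 : PySem.Chars.endswith c [' ', 'a', 'g'] = (['a', 'g'] == S.reverse) := EP ['a', 'g'] (by decide)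
    have E26 : PySem.Chars.endswith c [',', ' ', 'p', 't', 'y'] = (['p', 't', 'y'] == S.reverse && (P'.head? == some ',')) := EC ['p', 't', 'y'] (by decide)
    have E27 : PySem.Chars.endswith c [' ', 'p', 't', 'y'] = (['p', 't', 'y'] == S.reverse) := EP ['p', 't', 'y'] (by decide)
    by_cases hcoB : P'.head? = some ','
    · have hcb : (P'.head? == some ',') = true := by simp [hcoB]
      have hPne : P' ≠ [] := by cases P' <;> simp_all
      by_cases htok : S.reverse ∈ pvCommaTokens
      · simp only [pvCommaTokens, pvTokens, List.mem_append, List.mem_cons, List.not_mem_nil,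
          or_false] at htok
        rcases htok with ((h | h | h | h | h | h | h | h | h | h | h | h | h) | h)
        · -- token 'inc', comma present
          have hSl : S.length = 3 := by simpa using congrArg List.length h
          have hfind : pvSuffixes.find? (fun suf => PySem.Chars.endswith c suf) = some [',', ' ', 'i', 'n', 'c'] := by
            simp [pvSuffixes, List.find?_cons, E1, E2, E3, E4, E5, E6, E7, E8, E9, E10, E11, E12, E13, E14, E15, E16, E17, E18, E19, E20, E21, E22, E23, E24, E25, E26, E27, h, hcb]
          have hcont : pvCommaTokens.contains S.reverse = true := by rw [h]; decide
          rw [hfind, hrp]; dsimp only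
          rw [pv_head_comma, hcb, if_pos rfl, hcont, if_pos rfl,
            show (([',', ' ', 'i', 'n', 'c'] : List Char)).length = 5 from rfl]
          exact congrArg PySem.Chars.strip (pv_cut_comma c S P' hr 5 (by omega) hPne)
        · -- token 'inc.', comma present
          have hSl : S.length = 4 := by simpa using congrArg List.length h
          have hfind : pvSuffixes.find? (fun suf => PySem.Chars.endswith c suf) = some [',', ' ', 'i', 'n', 'c', '.'] := by
            simp [pvSuffixes, List.find?_cons, E1, E2, E3, E4, E5, E6, E7, E8, E9, E10, E11, E12, E13, E14, E15, E16, E17, E18, E19, E20, E21, E22, E23, E24, E25, E26, E27, h, hcb]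
          have hcont : pvCommaTokens.contains S.reverse = true := by rw [h]; decide
          rw [hfind, hrp]; dsimp only
          rw [pv_head_comma, hcb, if_pos rfl, hcont, if_pos rfl,
            show (([',', ' ', 'i', 'n', 'c', '.'] : List Char)).length = 6 from rfl]
          exact congrArg PySem.Chars.strip (pv_cut_comma c S P' hr 6 (by omega) hPne)
        · -- token 'llc', comma present
          have hSl : S.length = 3 := by simpa using congrArg List.length h
          have hfind : pvSuffixes.find? (fun suf => PySem.Chars.endswith c suf) = some [',', ' ', 'l', 'l', 'c'] := by
            simp [pvSuffixes, List.find?_cons, E1, E2, E3, E4, E5, E6, E7, E8, E9, E10, E11, E12, E13, E14, E15, E16, E17, E18, E19, E20, E21, E22, E23, E24, E25, E26, E27, h, hcb]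
          have hcont : pvCommaTokens.contains S.reverse = true := by rw [h]; decide
          rw [hfind, hrp]; dsimp only
          rw [pv_head_comma, hcb, if_pos rfl, hcont, if_pos rfl,
            show (([',', ' ', 'l', 'l', 'c'] : List Char)).length = 5 from rfl]
          exact congrArg PySem.Chars.strip (pv_cut_comma c S P' hr 5 (by omega) hPne)
        · -- token 'ltd', comma present
          have hSl : S.length = 3 := by simpa using congrArg List.length h
          have hfind : pvSuffixes.find? (fun suf => PySem.Chars.endswith c suf) = some [',', ' ', 'l', 't', 'd'] := by
            simp [pvSuffixes, List.find?_cons, E1, E2, E3, E4, E5, E6, E7, E8, E9, E10, E11, E12, E13, E14, E15, E16, E17, E18, E19, E20, E21, E22, E23, E24, E25, E26, E27, h, hcb]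
          have hcont : pvCommaTokens.contains S.reverse = true := by rw [h]; decide
          rw [hfind, hrp]; dsimp only
          rw [pv_head_comma, hcb, if_pos rfl, hcont, if_pos rfl,
            show (([',', ' ', 'l', 't', 'd'] : List Char)).length = 5 from rfl]
          exact congrArg PySem.Chars.strip (pv_cut_comma c S P' hr 5 (by omega) hPne)
        · -- token 'ltd.', comma present
          have hSl : S.length = 4 := by simpa using congrArg List.length h
          have hfind : pvSuffixes.find? (fun suf => PySem.Chars.endswith c suf) = some [',', ' ', 'l', 't', 'd', '.'] := by
            simp [pvSuffixes, List.find?_cons, E1, E2, E3, E4, E5, E6, E7, E8, E9, E10, E11, E12, E13, E14, E15, E16, E17, E18, E19, E20, E21, E22, E23, E24, E25, E26, E27, h, hcb]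
          have hcont : pvCommaTokens.contains S.reverse = true := by rw [h]; decide
          rw [hfind, hrp]; dsimp only
          rw [pv_head_comma, hcb, if_pos rfl, hcont, if_pos rfl,
            show (([',', ' ', 'l', 't', 'd', '.'] : List Char)).length = 6 from rfl]
          exact congrArg PySem.Chars.strip (pv_cut_comma c S P' hr 6 (by omega) hPne)
        · -- token 'corp', comma present
          have hSl : S.length = 4 := by simpa using congrArg List.length h
          have hfind : pvSuffixes.find? (fun suf => PySem.Chars.endswith c suf) = some [',', ' ', 'c', 'o', 'r', 'p'] := by
            simp [pvSuffixes, List.find?_cons, E1, E2, E3, E4, E5, E6, E7, E8, E9, E10, E11, E12, E13, E14, E15, E16, E17, E18, E19, E20, E21, E22, E23, E24, E25, E26, E27, h, hcb]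
          have hcont : pvCommaTokens.contains S.reverse = true := by rw [h]; decide
          rw [hfind, hrp]; dsimp only
          rw [pv_head_comma, hcb, if_pos rfl, hcont, if_pos rfl,
            show (([',', ' ', 'c', 'o', 'r', 'p'] : List Char)).length = 6 from rfl]
          exact congrArg PySem.Chars.strip (pv_cut_comma c S P' hr 6 (by omega) hPne)
        · -- token 'corp.', comma present
          have hSl : S.length = 5 := by simpa using congrArg List.length h
          have hfind : pvSuffixes.find? (fun suf => PySem.Chars.endswith c suf) = some [',', ' ', 'c', 'o', 'r', 'p', '.'] := by
            simp [pvSuffixes, List.find?_cons, E1, E2, E3, E4, E5, E6, E7, E8, E9, E10, E11, E12, E13, E14, E15, E16, E17, E18, E19, E20, E21, E22, E23, E24, E25, E26, E27, h, hcb]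
          have hcont : pvCommaTokens.contains S.reverse = true := by rw [h]; decide
          rw [hfind, hrp]; dsimp only
          rw [pv_head_comma, hcb, if_pos rfl, hcont, if_pos rfl,
            show (([',', ' ', 'c', 'o', 'r', 'p', '.'] : List Char)).length = 7 from rfl]
          exact congrArg PySem.Chars.strip (pv_cut_comma c S P' hr 7 (by omega) hPne)
        · -- token 'co.', comma present
          have hSl : S.length = 3 := by simpa using congrArg List.length h
          have hfind : pvSuffixes.find? (fun suf => PySem.Chars.endswith c suf) = some [',', ' ', 'c', 'o', '.'] := by
            simp [pvSuffixes, List.find?_cons, E1, E2, E3, E4, E5, E6, E7, E8, E9, E10, E11, E12, E13, E14, E15, E16, E17, E18, E19, E20, E21, E22, E23, E24, E25, E26, E27, h, hcb]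
          have hcont : pvCommaTokens.contains S.reverse = true := by rw [h]; decide
          rw [hfind, hrp]; dsimp only
          rw [pv_head_comma, hcb, if_pos rfl, hcont, if_pos rfl,
            show (([',', ' ', 'c', 'o', '.'] : List Char)).length = 5 from rfl]
          exact congrArg PySem.Chars.strip (pv_cut_comma c S P' hr 5 (by omega) hPne)
        · -- token 'gmbh', comma present
          have hSl : S.length = 4 := by simpa using congrArg List.length h
          have hfind : pvSuffixes.find? (fun suf => PySem.Chars.endswith c suf) = some [',', ' ', 'g', 'm', 'b', 'h'] := by
            simp [pvSuffixes, List.find?_cons, E1, E2, E3, E4, E5, E6, E7, E8, E9, E10, E11, E12, E13, E14, E15, E16, E17, E18, E19, E20, E21, E22, E23, E24, E25, E26, E27, h, hcb]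
          have hcont : pvCommaTokens.contains S.reverse = true := by rw [h]; decide
          rw [hfind, hrp]; dsimp only
          rw [pv_head_comma, hcb, if_pos rfl, hcont, if_pos rfl,
            show (([',', ' ', 'g', 'm', 'b', 'h'] : List Char)).length = 6 from rfl]
          exact congrArg PySem.Chars.strip (pv_cut_comma c S P' hr 6 (by omega) hPne)
        · -- token 's.a.', comma present
          have hSl : S.length = 4 := by simpa using congrArg List.length h
          have hfind : pvSuffixes.find? (fun suf => PySem.Chars.endswith c suf) = some [',', ' ', 's', '.', 'a', '.'] := by
            simp [pvSuffixes, List.find?_cons, E1, E2, E3, E4, E5, E6, E7, E8, E9, E10, E11, E12, E13, E14, E15, E16, E17, E18, E19, E20, E21, E22, E23, E24, E25, E26, E27, h, hcb]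
          have hcont : pvCommaTokens.contains S.reverse = true := by rw [h]; decide
          rw [hfind, hrp]; dsimp only
          rw [pv_head_comma, hcb, if_pos rfl, hcont, if_pos rfl,
            show (([',', ' ', 's', '.', 'a', '.'] : List Char)).length = 6 from rfl]
          exact congrArg PySem.Chars.strip (pv_cut_comma c S P' hr 6 (by omega) hPne)
        · -- token 'plc', comma present
          have hSl : S.length = 3 := by simpa using congrArg List.length h
          have hfind : pvSuffixes.find? (fun suf => PySem.Chars.endswith c suf) = some [',', ' ', 'p', 'l', 'c'] := by
            simp [pvSuffixes, List.find?_cons, E1, E2, E3, E4, E5, E6, E7, E8, E9, E10, E11, E12, E13, E14, E15, E16, E17, E18, E19, E20, E21, E22, E23, E24, E25, E26, E27, h, hcb]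
          have hcont : pvCommaTokens.contains S.reverse = true := by rw [h]; decide
          rw [hfind, hrp]; dsimp only
          rw [pv_head_comma, hcb, if_pos rfl, hcont, if_pos rfl,
            show (([',', ' ', 'p', 'l', 'c'] : List Char)).length = 5 from rfl]
          exact congrArg PySem.Chars.strip (pv_cut_comma c S P' hr 5 (by omega) hPne)
        · -- token 'ag', comma present
          have hSl : S.length = 2 := by simpa using congrArg List.length h
          have hfind : pvSuffixes.find? (fun suf => PySem.Chars.endswith c suf) = some [',', ' ', 'a', 'g'] := by
            simp [pvSuffixes, List.find?_cons, E1, E2, E3, E4, E5, E6, E7, E8, E9, E10, E11, E12, E13, E14, E15, E16, E17, E18, E19, E20, E21, E22, E23, E24, E25, E26, E27, h, hcb]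
          have hcont : pvCommaTokens.contains S.reverse = true := by rw [h]; decide
          rw [hfind, hrp]; dsimp only
          rw [pv_head_comma, hcb, if_pos rfl, hcont, if_pos rfl,
            show (([',', ' ', 'a', 'g'] : List Char)).length = 4 from rfl]
          exact congrArg PySem.Chars.strip (pv_cut_comma c S P' hr 4 (by omega) hPne)
        · -- token 'pty', comma present
          have hSl : S.length = 3 := by simpa using congrArg List.length h
          have hfind : pvSuffixes.find? (fun suf => PySem.Chars.endswith c suf) = some [',', ' ', 'p', 't', 'y'] := by
            simp [pvSuffixes, List.find?_cons, E1, E2, E3, E4, E5, E6, E7, E8, E9, E10, E11, E12, E13, E14, E15, E16, E17, E18, E19, E20, E21, E22, E23, E24, E25, E26, E27, h, hcb]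
          have hcont : pvCommaTokens.contains S.reverse = true := by rw [h]; decide
          rw [hfind, hrp]; dsimp only
          rw [pv_head_comma, hcb, if_pos rfl, hcont, if_pos rfl,
            show (([',', ' ', 'p', 't', 'y'] : List Char)).length = 5 from rfl]
          exact congrArg PySem.Chars.strip (pv_cut_comma c S P' hr 5 (by omega) hPne)
        · -- token 'co', comma present
          have hSl : S.length = 2 := by simpa using congrArg List.length h
          have hFco : ∀ X : List Char, X ∈ pvTokens → (X == S.reverse) = false := by
            intro X hX
            rw [beq_eq_false_iff_ne]
            intro hXe
            rw [hXe, h] at hX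
            revert hX
            decide
          have F1 : (['i', 'n', 'c'] == S.reverse) = false := hFco ['i', 'n', 'c'] (by decide)
          have F2 : (['i', 'n', 'c', '.'] == S.reverse) = false := hFco ['i', 'n', 'c', '.'] (by decide)
          have F3 : (['l', 'l', 'c'] == S.reverse) = false := hFco ['l', 'l', 'c'] (by decide)
          have F4 : (['l', 't', 'd'] == S.reverse) = false := hFco ['l', 't', 'd'] (by decide)
          have F5 : (['l', 't', 'd', '.'] == S.reverse) = false := hFco ['l', 't', 'd', '.'] (by decide)
          have F6 : (['c', 'o', 'r', 'p'] == S.reverse) = false := hFco ['c', 'o', 'r', 'p'] (by decide)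
          have F7 : (['c', 'o', 'r', 'p', '.'] == S.reverse) = false := hFco ['c', 'o', 'r', 'p', '.'] (by decide)
          have F8 : (['c', 'o', '.'] == S.reverse) = false := hFco ['c', 'o', '.'] (by decide)
          have F9 : (['g', 'm', 'b', 'h'] == S.reverse) = false := hFco ['g', 'm', 'b', 'h'] (by decide)
          have F10 : (['s', '.', 'a', '.'] == S.reverse) = false := hFco ['s', '.', 'a', '.'] (by decide)
          have F11 : (['p', 'l', 'c'] == S.reverse) = false := hFco ['p', 'l', 'c'] (by decide)
          have F12 : (['a', 'g'] == S.reverse) = false := hFco ['a', 'g'] (by decide)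
          have F13 : (['p', 't', 'y'] == S.reverse) = false := hFco ['p', 't', 'y'] (by decide)
          have hfind : pvSuffixes.find? (fun suf => PySem.Chars.endswith c suf) = some [',', ' ', 'c', 'o'] := by
            simp [pvSuffixes, List.find?_cons, E1, E2, E3, E4, E5, E6, E7, E8, E9, E10, E11, E12, E13, E14, E15, E16, E17, E18, E19, E20, E21, E22, E23, E24, E25, E26, E27, h, hcb, F1, F2, F3, F4, F5, F6, F7, F8, F9, F10, F11, F12, F13]
          have hcont : pvCommaTokens.contains S.reverse = true := by rw [h]; decide
          rw [hfind, hrp]; dsimp only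
          rw [pv_head_comma, hcb, if_pos rfl, hcont, if_pos rfl,
            show (([',', ' ', 'c', 'o'] : List Char)).length = 4 from rfl]
          exact congrArg PySem.Chars.strip (pv_cut_comma c S P' hr 4 (by omega) hPne)
      · -- no token matches: both sides leave c unchanged
        have Fgen : ∀ X : List Char, X ∈ pvTokens → (X == S.reverse) = false := by
          intro X hX
          rw [beq_eq_false_iff_ne]
          rintro rfl
          exact htok (List.mem_append.mpr (Or.inl hX))
        have F1 : (['i', 'n', 'c'] == S.reverse) = false := Fgen ['i', 'n', 'c'] (by decide)
        have F2 : (['i', 'n', 'c', '.'] == S.reverse) = false := Fgen ['i', 'n', 'c', '.'] (by decide)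
        have F3 : (['l', 'l', 'c'] == S.reverse) = false := Fgen ['l', 'l', 'c'] (by decide)
        have F4 : (['l', 't', 'd'] == S.reverse) = false := Fgen ['l', 't', 'd'] (by decide)
        have F5 : (['l', 't', 'd', '.'] == S.reverse) = false := Fgen ['l', 't', 'd', '.'] (by decide)
        have F6 : (['c', 'o', 'r', 'p'] == S.reverse) = false := Fgen ['c', 'o', 'r', 'p'] (by decide)
        have F7 : (['c', 'o', 'r', 'p', '.'] == S.reverse) = false := Fgen ['c', 'o', 'r', 'p', '.'] (by decide)
        have F8 : (['c', 'o', '.'] == S.reverse) = false := Fgen ['c', 'o', '.'] (by decide)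
        have F9 : (['g', 'm', 'b', 'h'] == S.reverse) = false := Fgen ['g', 'm', 'b', 'h'] (by decide)
        have F10 : (['s', '.', 'a', '.'] == S.reverse) = false := Fgen ['s', '.', 'a', '.'] (by decide)
        have F11 : (['p', 'l', 'c'] == S.reverse) = false := Fgen ['p', 'l', 'c'] (by decide)
        have F12 : (['a', 'g'] == S.reverse) = false := Fgen ['a', 'g'] (by decide)
        have F13 : (['p', 't', 'y'] == S.reverse) = false := Fgen ['p', 't', 'y'] (by decide)
        have Fco : ((['c', 'o'] : List Char) == S.reverse) = false := by
          rw [beq_eq_false_iff_ne]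
          intro hh
          exact htok (List.mem_append.mpr (Or.inr (by rw [← hh]; decide)))
        have hfind : pvSuffixes.find? (fun suf => PySem.Chars.endswith c suf) = none := by
          simp [pvSuffixes, List.find?_cons, E1, E2, E3, E4, E5, E6, E7, E8, E9, E10, E11, E12, E13, E14, E15, E16, E17, E18, E19, E20, E21, E22, E23, E24, E25, E26, E27, hcb, F1, F2, F3, F4, F5, F6, F7, F8, F9, F10, F11, F12, F13, Fco]
        have hcont : pvCommaTokens.contains S.reverse = false := by
          cases hc : pvCommaTokens.contains S.reverse
          · rfl
          · exact absurd (by simpa using hc) htok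
        rw [hfind, hrp]; dsimp only
        rw [pv_head_comma, hcb, if_pos rfl, hcont]
        simp
    · have hcb : (P'.head? == some ',') = false := by
        rw [beq_eq_false_iff_ne]
        exact hcoB
      by_cases htok : S.reverse ∈ pvTokens
      · simp only [pvTokens, List.mem_cons, List.not_mem_nil, or_false] at htok
        rcases htok with h | h | h | h | h | h | h | h | h | h | h | h | h
        · -- token 'inc', no comma
          have hSl : S.length = 3 := by simpa using congrArg List.length h
          have hfind : pvSuffixes.find? (fun suf => PySem.Chars.endswith c suf) = some [' ', 'i', 'n', 'c'] := by
            simp [pvSuffixes, List.find?_cons, E1, E2, E3, E4, E5, E6, E7, E8, E9, E10, E11, E12, E13, E14, E15, E16, E17, E18, E19, E20, E21, E22, E23, E24, E25, E26, E27, h, hcb]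
          have hcont : pvTokens.contains S.reverse = true := by rw [h]; decide
          rw [hfind, hrp]; dsimp only
          rw [pv_head_comma, hcb, if_neg (by simp), hcont, if_pos rfl,
            show (([' ', 'i', 'n', 'c'] : List Char)).length = 4 from rfl]
          exact congrArg PySem.Chars.strip (pv_cut_plain c S P' hr 4 (by omega))
        · -- token 'inc.', no comma
          have hSl : S.length = 4 := by simpa using congrArg List.length h
          have hfind : pvSuffixes.find? (fun suf => PySem.Chars.endswith c suf) = some [' ', 'i', 'n', 'c', '.'] := by
            simp [pvSuffixes, List.find?_cons, E1, E2, E3, E4, E5, E6, E7, E8, E9, E10, E11, E12, E13, E14, E15, E16, E17, E18, E19, E20, E21, E22, E23, E24, E25, E26, E27, h, hcb]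
          have hcont : pvTokens.contains S.reverse = true := by rw [h]; decide
          rw [hfind, hrp]; dsimp only
          rw [pv_head_comma, hcb, if_neg (by simp), hcont, if_pos rfl,
            show (([' ', 'i', 'n', 'c', '.'] : List Char)).length = 5 from rfl]
          exact congrArg PySem.Chars.strip (pv_cut_plain c S P' hr 5 (by omega))
        · -- token 'llc', no comma
          have hSl : S.length = 3 := by simpa using congrArg List.length h
          have hfind : pvSuffixes.find? (fun suf => PySem.Chars.endswith c suf) = some [' ', 'l', 'l', 'c'] := by
            simp [pvSuffixes, List.find?_cons, E1, E2, E3, E4, E5, E6, E7, E8, E9, E10, E11, E12, E13, E14, E15, E16, E17, E18, E19, E20, E21, E22, E23, E24, E25, E26, E27, h, hcb]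
          have hcont : pvTokens.contains S.reverse = true := by rw [h]; decide
          rw [hfind, hrp]; dsimp only
          rw [pv_head_comma, hcb, if_neg (by simp), hcont, if_pos rfl,
            show (([' ', 'l', 'l', 'c'] : List Char)).length = 4 from rfl]
          exact congrArg PySem.Chars.strip (pv_cut_plain c S P' hr 4 (by omega))
        · -- token 'ltd', no comma
          have hSl : S.length = 3 := by simpa using congrArg List.length h
          have hfind : pvSuffixes.find? (fun suf => PySem.Chars.endswith c suf) = some [' ', 'l', 't', 'd'] := by
            simp [pvSuffixes, List.find?_cons, E1, E2, E3, E4, E5, E6, E7, E8, E9, E10, E11, E12, E13, E14, E15, E16, E17, E18, E19, E20, E21, E22, E23, E24, E25, E26, E27, h, hcb]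
          have hcont : pvTokens.contains S.reverse = true := by rw [h]; decide
          rw [hfind, hrp]; dsimp only
          rw [pv_head_comma, hcb, if_neg (by simp), hcont, if_pos rfl,
            show (([' ', 'l', 't', 'd'] : List Char)).length = 4 from rfl]
          exact congrArg PySem.Chars.strip (pv_cut_plain c S P' hr 4 (by omega))
        · -- token 'ltd.', no comma
          have hSl : S.length = 4 := by simpa using congrArg List.length h
          have hfind : pvSuffixes.find? (fun suf => PySem.Chars.endswith c suf) = some [' ', 'l', 't', 'd', '.'] := by
            simp [pvSuffixes, List.find?_cons, E1, E2, E3, E4, E5, E6, E7, E8, E9, E10, E11, E12, E13, E14, E15, E16, E17, E18, E19, E20, E21, E22, E23, E24, E25, E26, E27, h, hcb]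
          have hcont : pvTokens.contains S.reverse = true := by rw [h]; decide
          rw [hfind, hrp]; dsimp only
          rw [pv_head_comma, hcb, if_neg (by simp), hcont, if_pos rfl,
            show (([' ', 'l', 't', 'd', '.'] : List Char)).length = 5 from rfl]
          exact congrArg PySem.Chars.strip (pv_cut_plain c S P' hr 5 (by omega))
        · -- token 'corp', no comma
          have hSl : S.length = 4 := by simpa using congrArg List.length h
          have hfind : pvSuffixes.find? (fun suf => PySem.Chars.endswith c suf) = some [' ', 'c', 'o', 'r', 'p'] := by
            simp [pvSuffixes, List.find?_cons, E1, E2, E3, E4, E5, E6, E7, E8, E9, E10, E11, E12, E13, E14, E15, E16, E17, E18, E19, E20, E21, E22, E23, E24, E25, E26, E27, h, hcb]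
          have hcont : pvTokens.contains S.reverse = true := by rw [h]; decide
          rw [hfind, hrp]; dsimp only
          rw [pv_head_comma, hcb, if_neg (by simp), hcont, if_pos rfl,
            show (([' ', 'c', 'o', 'r', 'p'] : List Char)).length = 5 from rfl]
          exact congrArg PySem.Chars.strip (pv_cut_plain c S P' hr 5 (by omega))
        · -- token 'corp.', no comma
          have hSl : S.length = 5 := by simpa using congrArg List.length h
          have hfind : pvSuffixes.find? (fun suf => PySem.Chars.endswith c suf) = some [' ', 'c', 'o', 'r', 'p', '.'] := by
            simp [pvSuffixes, List.find?_cons, E1, E2, E3, E4, E5, E6, E7, E8, E9, E10, E11, E12, E13, E14, E15, E16, E17, E18, E19, E20, E21, E22, E23, E24, E25, E26, E27, h, hcb]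
          have hcont : pvTokens.contains S.reverse = true := by rw [h]; decide
          rw [hfind, hrp]; dsimp only
          rw [pv_head_comma, hcb, if_neg (by simp), hcont, if_pos rfl,
            show (([' ', 'c', 'o', 'r', 'p', '.'] : List Char)).length = 6 from rfl]
          exact congrArg PySem.Chars.strip (pv_cut_plain c S P' hr 6 (by omega))
        · -- token 'co.', no comma
          have hSl : S.length = 3 := by simpa using congrArg List.length h
          have hfind : pvSuffixes.find? (fun suf => PySem.Chars.endswith c suf) = some [' ', 'c', 'o', '.'] := by
            simp [pvSuffixes, List.find?_cons, E1, E2, E3, E4, E5, E6, E7, E8, E9, E10, E11, E12, E13, E14, E15, E16, E17, E18, E19, E20, E21, E22, E23, E24, E25, E26, E27, h, hcb]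
          have hcont : pvTokens.contains S.reverse = true := by rw [h]; decide
          rw [hfind, hrp]; dsimp only
          rw [pv_head_comma, hcb, if_neg (by simp), hcont, if_pos rfl,
            show (([' ', 'c', 'o', '.'] : List Char)).length = 4 from rfl]
          exact congrArg PySem.Chars.strip (pv_cut_plain c S P' hr 4 (by omega))
        · -- token 'gmbh', no comma
          have hSl : S.length = 4 := by simpa using congrArg List.length h
          have hfind : pvSuffixes.find? (fun suf => PySem.Chars.endswith c suf) = some [' ', 'g', 'm', 'b', 'h'] := by
            simp [pvSuffixes, List.find?_cons, E1, E2, E3, E4, E5, E6, E7, E8, E9, E10, E11, E12, E13, E14, E15, E16, E17, E18, E19, E20, E21, E22, E23, E24, E25, E26, E27, h, hcb]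
          have hcont : pvTokens.contains S.reverse = true := by rw [h]; decide
          rw [hfind, hrp]; dsimp only
          rw [pv_head_comma, hcb, if_neg (by simp), hcont, if_pos rfl,
            show (([' ', 'g', 'm', 'b', 'h'] : List Char)).length = 5 from rfl]
          exact congrArg PySem.Chars.strip (pv_cut_plain c S P' hr 5 (by omega))
        · -- token 's.a.', no comma
          have hSl : S.length = 4 := by simpa using congrArg List.length h
          have hfind : pvSuffixes.find? (fun suf => PySem.Chars.endswith c suf) = some [' ', 's', '.', 'a', '.'] := by
            simp [pvSuffixes, List.find?_cons, E1, E2, E3, E4, E5, E6, E7, E8, E9, E10, E11, E12, E13, E14, E15, E16, E17, E18, E19, E20, E21, E22, E23, E24, E25, E26, E27, h, hcb]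
          have hcont : pvTokens.contains S.reverse = true := by rw [h]; decide
          rw [hfind, hrp]; dsimp only
          rw [pv_head_comma, hcb, if_neg (by simp), hcont, if_pos rfl,
            show (([' ', 's', '.', 'a', '.'] : List Char)).length = 5 from rfl]
          exact congrArg PySem.Chars.strip (pv_cut_plain c S P' hr 5 (by omega))
        · -- token 'plc', no comma
          have hSl : S.length = 3 := by simpa using congrArg List.length h
          have hfind : pvSuffixes.find? (fun suf => PySem.Chars.endswith c suf) = some [' ', 'p', 'l', 'c'] := by
            simp [pvSuffixes, List.find?_cons, E1, E2, E3, E4, E5, E6, E7, E8, E9, E10, E11, E12, E13, E14, E15, E16, E17, E18, E19, E20, E21, E22, E23, E24, E25, E26, E27, h, hcb]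
          have hcont : pvTokens.contains S.reverse = true := by rw [h]; decide
          rw [hfind, hrp]; dsimp only
          rw [pv_head_comma, hcb, if_neg (by simp), hcont, if_pos rfl,
            show (([' ', 'p', 'l', 'c'] : List Char)).length = 4 from rfl]
          exact congrArg PySem.Chars.strip (pv_cut_plain c S P' hr 4 (by omega))
        · -- token 'ag', no comma
          have hSl : S.length = 2 := by simpa using congrArg List.length h
          have hfind : pvSuffixes.find? (fun suf => PySem.Chars.endswith c suf) = some [' ', 'a', 'g'] := by
            simp [pvSuffixes, List.find?_cons, E1, E2, E3, E4, E5, E6, E7, E8, E9, E10, E11, E12, E13, E14, E15, E16, E17, E18, E19, E20, E21, E22, E23, E24, E25, E26, E27, h, hcb]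
          have hcont : pvTokens.contains S.reverse = true := by rw [h]; decide
          rw [hfind, hrp]; dsimp only
          rw [pv_head_comma, hcb, if_neg (by simp), hcont, if_pos rfl,
            show (([' ', 'a', 'g'] : List Char)).length = 3 from rfl]
          exact congrArg PySem.Chars.strip (pv_cut_plain c S P' hr 3 (by omega))
        · -- token 'pty', no comma
          have hSl : S.length = 3 := by simpa using congrArg List.length h
          have hfind : pvSuffixes.find? (fun suf => PySem.Chars.endswith c suf) = some [' ', 'p', 't', 'y'] := by
            simp [pvSuffixes, List.find?_cons, E1, E2, E3, E4, E5, E6, E7, E8, E9, E10, E11, E12, E13, E14, E15, E16, E17, E18, E19, E20, E21, E22, E23, E24, E25, E26, E27, h, hcb]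
          have hcont : pvTokens.contains S.reverse = true := by rw [h]; decide
          rw [hfind, hrp]; dsimp only
          rw [pv_head_comma, hcb, if_neg (by simp), hcont, if_pos rfl,
            show (([' ', 'p', 't', 'y'] : List Char)).length = 4 from rfl]
          exact congrArg PySem.Chars.strip (pv_cut_plain c S P' hr 4 (by omega))
      · -- no token matches: both sides leave c unchanged
        have Fgen : ∀ X : List Char, X ∈ pvTokens → (X == S.reverse) = false := by
          intro X hX
          rw [beq_eq_false_iff_ne]
          rintro rfl
          exact htok hX
        have F1 : (['i', 'n', 'c'] == S.reverse) = false := Fgen ['i', 'n', 'c'] (by decide)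
        have F2 : (['i', 'n', 'c', '.'] == S.reverse) = false := Fgen ['i', 'n', 'c', '.'] (by decide)
        have F3 : (['l', 'l', 'c'] == S.reverse) = false := Fgen ['l', 'l', 'c'] (by decide)
        have F4 : (['l', 't', 'd'] == S.reverse) = false := Fgen ['l', 't', 'd'] (by decide)
        have F5 : (['l', 't', 'd', '.'] == S.reverse) = false := Fgen ['l', 't', 'd', '.'] (by decide)
        have F6 : (['c', 'o', 'r', 'p'] == S.reverse) = false := Fgen ['c', 'o', 'r', 'p'] (by decide)
        have F7 : (['c', 'o', 'r', 'p', '.'] == S.reverse) = false := Fgen ['c', 'o', 'r', 'p', '.'] (by decide)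
        have F8 : (['c', 'o', '.'] == S.reverse) = false := Fgen ['c', 'o', '.'] (by decide)
        have F9 : (['g', 'm', 'b', 'h'] == S.reverse) = false := Fgen ['g', 'm', 'b', 'h'] (by decide)
        have F10 : (['s', '.', 'a', '.'] == S.reverse) = false := Fgen ['s', '.', 'a', '.'] (by decide)
        have F11 : (['p', 'l', 'c'] == S.reverse) = false := Fgen ['p', 'l', 'c'] (by decide)
        have F12 : (['a', 'g'] == S.reverse) = false := Fgen ['a', 'g'] (by decide)
        have F13 : (['p', 't', 'y'] == S.reverse) = false := Fgen ['p', 't', 'y'] (by decide)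
        have hfind : pvSuffixes.find? (fun suf => PySem.Chars.endswith c suf) = none := by
          simp [pvSuffixes, List.find?_cons, E1, E2, E3, E4, E5, E6, E7, E8, E9, E10, E11, E12, E13, E14, E15, E16, E17, E18, E19, E20, E21, E22, E23, E24, E25, E26, E27, hcb, F1, F2, F3, F4, F5, F6, F7, F8, F9, F10, F11, F12, F13]
        have hcont : pvTokens.contains S.reverse = false := by
          cases hc : pvTokens.contains S.reverse
          · rfl
          · exact absurd (by simpa using hc) htok
        rw [hfind, hrp]; dsimp only
        rw [pv_head_comma, hcb, if_neg (by simp), hcont]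
        simp
  · have hj : PySem.Chars.find c.reverse [' '] = -1 := by
      rw [PySem.Chars.find_eq_neg_one_iff]
      rintro ⟨u, v, huv⟩
      exact hmem (by rw [← huv]; simp)
    have hA : pvSuffixes.find? (fun suf => PySem.Chars.endswith c suf) = none := by
      rw [List.find?_eq_none]
      intro suf hsuf
      simp only [Bool.not_eq_true]
      rcases hE : PySem.Chars.endswith c suf with _ | _
      · rfl
      · exfalso
        have hsc : suf <:+ c := (PySem.Chars.endswith_iff _ _).mp hE
        have hsp : ' ' ∈ suf := (show ∀ x ∈ pvSuffixes, ' ' ∈ x by decide) suf hsuf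
        rcases hsc with ⟨u, hu⟩
        exact hmem (by rw [← hu]; simp [hsp])
    have hB : pvRPartSpace c = none := by
      unfold pvRPartSpace
      rw [hj]
      rfl
    rw [hA, hB]

-- ===== VERDICT (by name: the statement is the Claim_ definition above) =====
theorem normalise_company_py_spec : Claim_equal_normalise_company_py := by
  intro company _
  unfold Spec_normalise_company_py normalise_company_py normalise_company_py_alt
  exact congrArg (fun l => String.ofList (pvRstripCD l)) (pv_mid_eq _)
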